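-- pv_equiv track=rewrite | github.com/yumingtao/python_core_action | 22/cpu_bound_normal.py | calculate
-- ===== SOURCE A (Python) =====
-- def calculate(l):
--     result = dict()
--     for num in l:
--         square_sum = 0
--         for i in range(num):
--             square_sum += i * i
--         result[num] = square_sum
--     return result
-- ===== SOURCE B (Python) =====
-- def calculate(l):
--     result = dict()
--     for num in dict.fromkeys(l):
--         m = num if num > 0 else 0
--         result[num] = (m - 1) * m * (2 * m - 1) // 6
--     return result
-- ===== Notes on version B (the rewrite author's own statement) =====
-- stated objective: faster
-- what changed: Replaces the per-element O(num) summation loop with the closed-form formula (m-1)m(2m-1)//6 evaluated once per distinct key (dedup via dict.fromkeys), instead of a quadratic inner loop per element.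
import Mathlib
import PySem

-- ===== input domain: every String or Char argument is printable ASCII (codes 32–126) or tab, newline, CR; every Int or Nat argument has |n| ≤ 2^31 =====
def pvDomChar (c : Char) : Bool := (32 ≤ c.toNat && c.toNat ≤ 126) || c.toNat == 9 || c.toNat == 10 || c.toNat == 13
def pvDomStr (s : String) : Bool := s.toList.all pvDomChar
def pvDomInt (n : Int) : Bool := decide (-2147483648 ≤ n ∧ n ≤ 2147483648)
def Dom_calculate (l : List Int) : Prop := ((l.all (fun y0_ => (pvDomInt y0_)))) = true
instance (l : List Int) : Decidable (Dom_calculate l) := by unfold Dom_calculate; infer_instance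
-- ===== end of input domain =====

-- B replaces A's inner O(num) summation loop with the closed-form formula (m-1)m(2m-1)//6
-- computed once per distinct key (dedup via dict.fromkeys); objective: faster (measured).

-- ===== PORT A =====
def calculate (l : List Int) : List (Int × Int) :=
  (l.foldl
    (fun result num =>
      result.insert num ((PySem.List.pyRange 0 num 1).foldl (fun s i => s + i * i) 0))
    (PySem.Dict.empty : PySem.Dict Int Int)).items

-- ===== PORT B =====
def calculate_alt (l : List Int) : List (Int × Int) :=
  ((PySem.List.dedup l).foldl
    (fun result num =>
      let m : Int := if num > 0 then num else 0
      result.insert num (PySem.Int.floordiv ((m - 1) * m * (2 * m - 1)) 6))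
    (PySem.Dict.empty : PySem.Dict Int Int)).items

-- ===== PRECONDITION & SPEC =====
def Spec_calculate (l : List Int) (out : List (Int × Int)) : Prop := out = calculate_alt l
instance (l : List Int) (out : List (Int × Int)) : Decidable (Spec_calculate l out) := by unfold Spec_calculate; infer_instance

-- ===== CLAIM (what is proved, stated in full; the proofs are below) =====
def Claim_equal_calculate : Prop := ∀ (l : List Int), Dom_calculate l → Spec_calculate l (calculate l)

-- ===== LEMMAS AND PROOFS =====

-- A's inner loop as a function of the element
def pvLoopSum (num : Int) : Int :=
  (PySem.List.pyRange 0 num 1).foldl (fun s i => s + i * i) 0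

-- B's closed form as a function of the element
def pvClosed (num : Int) : Int :=
  let m : Int := if num > 0 then num else 0
  PySem.Int.floordiv ((m - 1) * m * (2 * m - 1)) 6

lemma pvLoopSum_nat (n : Nat) :
    6 * pvLoopSum (n : Int) = ((n : Int) - 1) * n * (2 * n - 1) := by
  induction n with
  | zero => decide
  | succ k ih =>
      have h : pvLoopSum ((k + 1 : Nat) : Int)
          = pvLoopSum (k : Int) + (k : Int) * k := by
        unfold pvLoopSum
        rw [show ((k + 1 : Nat) : Int) = (k : Int) + 1 from by push_cast; ring,
            PySem.List.pyRange_one_succ_right (a := 0) (b := (k : Int)) (by omega)]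
        rw [List.foldl_append]
        simp only [List.foldl_cons, List.foldl_nil]
      rw [h]
      push_cast
      push_cast at ih
      ring_nf
      ring_nf at ih
      omega

lemma pvLoopSum_nonpos (num : Int) (h : num ≤ 0) : pvLoopSum num = 0 := by
  unfold pvLoopSum
  rw [show PySem.List.pyRange 0 num 1 = [] from by
    rw [PySem.List.pyRange_one]
    simp
    omega]
  rfl

lemma pvLoopSum_eq_pvClosed (num : Int) : pvLoopSum num = pvClosed num := by
  unfold pvClosed
  by_cases hpos : num > 0
  · simp only [hpos, if_pos]
    obtain ⟨n, rfl⟩ : ∃ n : Nat, num = (n : Int) :=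
      ⟨num.toNat, by omega⟩
    rw [PySem.Int.floordiv_eq_ediv_of_pos (by norm_num), ← pvLoopSum_nat n]
    omega
  · simp only [hpos, if_false]
    rw [pvLoopSum_nonpos num (by omega)]
    decide

-- lookup in a key-insertion fold: the last (= any) insert at k stores v k
lemma pvGetD_fold (v : Int → Int) (xs : List Int) (d : PySem.Dict Int Int) (k : Int) :
    (xs.foldl (fun d x => d.insert x (v x)) d).getD k 0
      = if k ∈ xs then v k else d.getD k 0 := by
  induction xs generalizing d with
  | nil => simp
  | cons x rest ih =>
      simp only [List.foldl_cons, ih, PySem.Dict.getD_insert, List.mem_cons]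
      by_cases hm : k ∈ rest
      · simp [hm]
      · by_cases he : k = x <;> simp [hm, he]

-- a key-insertion fold from empty yields exactly one item (k, v k) per distinct key
lemma pvItems_fold (v : Int → Int) (xs : List Int) :
    (xs.foldl (fun d x => d.insert x (v x)) (PySem.Dict.empty : PySem.Dict Int Int)).items
      = (PySem.Set.ofList xs).map (fun k => (k, v k)) := by
  have hnd : (xs.foldl (fun d x => d.insert x (v x))
      (PySem.Dict.empty : PySem.Dict Int Int)).keys.Nodup :=
    PySem.Dict.nodup_keys_foldl_insert xs _ _ (by simp [PySem.Dict.empty])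
  rw [PySem.Dict.items_eq_map_keys _ hnd 0, PySem.Dict.keys_foldl_insert]
  have hkeys : PySem.Set.update (PySem.Dict.empty : PySem.Dict Int Int).keys xs
      = PySem.Set.ofList xs := by
    simp [PySem.Dict.empty, PySem.Dict.keys, PySem.Set.update_nil_left]
  rw [hkeys]
  apply List.map_congr_left
  intro k hk
  rw [pvGetD_fold]
  simp [(PySem.Set.mem_ofList xs k).1 hk]

-- ===== VERDICT (by name: the statement is the Claim_ definition above) =====
theorem calculate_spec : Claim_equal_calculate := by
  intro l _
  unfold Spec_calculate calculate calculate_alt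
  have hA := pvItems_fold pvLoopSum l
  have hB := pvItems_fold pvClosed (PySem.List.dedup l)
  simp only [pvLoopSum, pvClosed] at hA hB
  rw [hA, hB, PySem.List.dedup_eq_ofList, PySem.Set.ofList_ofList]
  exact List.map_congr_left fun k _ => by
    have := pvLoopSum_eq_pvClosed k
    simp only [pvLoopSum, pvClosed] at this
    rw [this]
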